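-- pv_equiv track=rewrite | github.com/PKalozoumis/CEID-Thesis-2025 | mypackage/clustering/clustering.py | label_positions
-- ===== SOURCE A (Python) =====
-- def label_positions(labels: list[int]) -> dict[int, list[int]]:
--     '''
--     Inverts the label list. For each label, it returns the indices where it occurs
--
--     Arguments
--     ---
--     labels: list[int]
--         A list of cluster labels. One label for each chain in ```chains```. This is the result of ```chain_clustering```
--
--     Returns
--     ---
--     indices: dict[int[int]]
--         A dictionary mapping each label to its indices
--     '''
--
--     indices = {}
--
--     for i, label in enumerate(labels):
--         if label in indices:
--             indices[label].append(i)
--         else: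
--             indices[label] = [i]
--
--     return indices
-- ===== SOURCE B (Python) =====
-- def label_positions(labels: list[int]) -> dict[int, list[int]]:
--     '''Inverts the label list: maps each label to the list of indices where it occurs.'''
--     return {l: [i for i, x in enumerate(labels) if x == l] for l in dict.fromkeys(labels)}
-- ===== Notes on version B (the rewrite author's own statement) =====
-- stated objective: idiomatic
-- what changed: Replaces the incremental dict-of-growing-lists loop by a one-line dict comprehension: the distinct labels are taken in first-occurrence order via dict.fromkeys, and each label's index list is gathered by its own enumerate scan.
import Mathlib
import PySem

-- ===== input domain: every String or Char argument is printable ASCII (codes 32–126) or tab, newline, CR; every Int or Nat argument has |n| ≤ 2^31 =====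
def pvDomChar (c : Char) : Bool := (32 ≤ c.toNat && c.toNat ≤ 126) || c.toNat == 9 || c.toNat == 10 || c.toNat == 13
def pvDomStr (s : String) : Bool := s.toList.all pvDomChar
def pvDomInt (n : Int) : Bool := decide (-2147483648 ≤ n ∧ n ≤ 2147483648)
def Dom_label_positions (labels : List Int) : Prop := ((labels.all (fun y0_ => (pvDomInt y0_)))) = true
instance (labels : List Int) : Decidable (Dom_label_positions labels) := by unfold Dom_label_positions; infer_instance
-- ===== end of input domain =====

-- ===== PORT A =====
-- One honest line: B is an idiomatic one-line dict comprehension (distinct labels via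
-- dict.fromkeys, one enumerate scan per label) instead of A's incremental dict-of-lists loop.
def label_positions (labels : List Int) : List (Int × List Int) :=
  ((PySem.List.enumerate labels).foldl
    (fun indices p =>
      if indices.contains p.2 then indices.modify p.2 [] (fun v => v ++ [p.1])
      else indices.insert p.2 [p.1])
    PySem.Dict.empty).items

-- ===== PORT B =====
def label_positions_alt (labels : List Int) : List (Int × List Int) :=
  (PySem.List.dedup labels).map (fun l =>
    (l, (PySem.List.enumerate labels).filterMap (fun p => if p.2 = l then some p.1 else none)))

-- ===== PRECONDITION & SPEC =====
def Spec_label_positions (labels : List Int) (out : List (Int × List Int)) : Prop := out = label_positions_alt labels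
instance (labels : List Int) (out : List (Int × List Int)) : Decidable (Spec_label_positions labels out) := by unfold Spec_label_positions; infer_instance

-- ===== CLAIM (what is proved, stated in full; the proofs are below) =====
def Claim_equal_label_positions : Prop := ∀ (labels : List Int), Dom_label_positions labels → Spec_label_positions labels (label_positions labels)

-- ===== LEMMAS AND PROOFS =====
theorem step_eq_modify (d : PySem.Dict Int (List Int)) (p : Int × Int) :
    (if d.contains p.2 then d.modify p.2 [] (fun v => v ++ [p.1]) else d.insert p.2 [p.1])
      = d.modify p.2 [] (fun v => v ++ [p.1]) := by
  by_cases h : d.contains p.2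
  · simp [h]
  · simp only [Bool.not_eq_true] at h
    simp [h, PySem.Dict.modify, PySem.Dict.getD_of_not_contains _ _ h]

theorem filter_swap_eq_filterMap (l : List (Int × Int)) (c : Int) :
    ((l.map Prod.swap).filter (fun p => p.1 == c)).map (fun p => p.2)
      = l.filterMap (fun p => if p.2 = c then some p.1 else none) := by
  induction l with
  | nil => rfl
  | cons x xs ih =>
    by_cases h : x.2 = c <;>
      simp [Prod.swap, h, ih]

-- ===== VERDICT =====
theorem label_positions_spec : Claim_equal_label_positions := by
  unfold Claim_equal_label_positions
  intro labels _
  unfold Spec_label_positions label_positions label_positions_alt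
  rw [PySem.List.foldl_congr_mem (PySem.List.enumerate labels) _
        (fun d p => d.modify p.2 [] (fun v => v ++ [p.1])) PySem.Dict.empty
        (fun d p _ => step_eq_modify d p)]
  have hswap : (PySem.List.enumerate labels).foldl
      (fun d p => d.modify p.2 [] (fun v => v ++ [p.1])) PySem.Dict.empty
    = ((PySem.List.enumerate labels).map Prod.swap).foldl
      (fun d p => d.modify p.1 [] (fun v => v ++ [p.2])) PySem.Dict.empty := by
    simp [List.foldl_map]
  rw [hswap]
  set L := (PySem.List.enumerate labels).map Prod.swap with hL
  have hnd : (L.foldl (fun d p => d.modify p.1 [] (fun v => v ++ [p.2])) PySem.Dict.empty).keys.Nodup := by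
    exact PySem.Dict.nodup_keys_foldl_modify_key L (fun p => p.1) [] _ _ PySem.Dict.nodup_keys_empty
  rw [PySem.Dict.items_eq_map_keys _ hnd []]
  have hkeys : (L.foldl (fun d p => d.modify p.1 [] (fun v => v ++ [p.2])) PySem.Dict.empty).keys
      = PySem.List.dedup labels := by
    rw [PySem.Dict.keys_foldl_modify_key]
    simp only [hL, List.map_map, Function.comp_def, Prod.fst_swap, PySem.Dict.keys_empty,
      PySem.List.map_snd_enumerate, PySem.List.dedup_eq_ofList, PySem.Set.ofList_eq_foldl,
      PySem.Set.update]
  rw [hkeys]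
  apply List.map_congr_left
  intro l _
  have := PySem.Dict.getD_foldl_modify_append L PySem.Dict.empty l
  simp only [PySem.Dict.getD_empty, List.nil_append] at this
  rw [this, hL, filter_swap_eq_filterMap]
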